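-- pv_equiv track=rewrite | github.com/alex-ramos-232609241/-efficient_python_scripts | minAndMaxSecundaryDiagonal.py | solution
-- ===== SOURCE A (Python) =====
-- def solution(grid):
--     # TODO: implement the solution here
--     """
--     -return [min, max]
--     """
--     if len(grid) == 0:
--         return [None, None]
--
--     n = len(grid)
--
--     row = n - 1
--     colum = 0
--
--     min = None
--     max = None
--
--     while row >= 0 and colum < n:
--         if min is None and max is None:
--             min = grid[row][colum]
--             max = grid[row][colum]
--         elif grid[row][colum] <= min:
--             min = grid[row][colum]
--         elif grid[row][colum] >= max:
--             max = grid[row][colum]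
--
--         colum += 1
--         row -= 1
--     return [min, max]
-- ===== SOURCE B (Python) =====
-- def solution(grid):
--     if len(grid) == 0:
--         return [None, None]
--     n = len(grid)
--     s = sorted(grid[n - 1 - i][i] for i in range(n))
--     return [s[0], s[-1]]
-- ===== Notes on version B (the rewrite author's own statement) =====
-- stated objective: alternative
-- what changed: Replaces A's single-pass while loop with two counters and None-sentinel fused min/max tracking by sorting the anti-diagonal and taking the first and last element of the sorted list.
import Mathlib
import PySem

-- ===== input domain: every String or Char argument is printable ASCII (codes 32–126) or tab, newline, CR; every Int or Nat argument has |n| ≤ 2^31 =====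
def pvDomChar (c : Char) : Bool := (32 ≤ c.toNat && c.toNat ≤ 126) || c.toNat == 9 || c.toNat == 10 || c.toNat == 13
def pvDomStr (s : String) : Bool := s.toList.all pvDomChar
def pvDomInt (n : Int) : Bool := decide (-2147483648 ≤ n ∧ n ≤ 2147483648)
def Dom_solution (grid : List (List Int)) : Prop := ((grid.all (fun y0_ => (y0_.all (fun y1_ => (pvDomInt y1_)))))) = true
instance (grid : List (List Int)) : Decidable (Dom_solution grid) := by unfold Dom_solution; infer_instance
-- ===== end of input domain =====

-- B sorts the anti-diagonal and returns its first and last element, instead of A's manual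
-- while loop with two counters and None-sentinel fused min/max tracking.

-- ===== PORT A =====
-- the while loop of A, state (row, colum, min, max); element access is pyGetD, exact under Pre_
def solutionLoop (grid : List (List Int)) (n row colum : Int) (mn mx : Option Int) :
    Option Int × Option Int :=
  if h : 0 ≤ row ∧ colum < n then
    let v := PySem.List.pyGetD (PySem.List.pyGetD grid row []) colum 0
    let st : Option Int × Option Int :=
      match mn, mx with
      | none, none => (some v, some v)
      | some a, some b =>
          if v ≤ a then (some v, some b)
          else if v ≥ b then (some a, some v)
          else (some a, some b)
      | mn, mx => (mn, mx)  -- unreachable in A (min/max are set together)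
    solutionLoop grid n (row - 1) (colum + 1) st.1 st.2
  else (mn, mx)
termination_by (row + 1).toNat
decreasing_by omega

def solution (grid : List (List Int)) : List (Option Int) :=
  if grid.length = 0 then [none, none]
  else
    let n : Int := grid.length
    let r := solutionLoop grid n (n - 1) 0 none none
    [r.1, r.2]

-- ===== PORT B =====
def solution_alt (grid : List (List Int)) : List (Option Int) :=
  if grid.length = 0 then [none, none]
  else
    let n := grid.length
    let s := PySem.List.sorted ((PySem.List.pyRange 0 n 1).map
      (fun i => PySem.List.pyGetD (PySem.List.pyGetD grid ((n : Int) - 1 - i) []) i 0))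
      (fun x => x) false
    [PySem.List.pyGet? s 0, PySem.List.pyGet? s (-1)]

-- ===== PRECONDITION & SPEC =====
-- Pre_ excludes exactly the ragged grids on which A's access grid[n-1-i][i] raises IndexError
-- (B's generator raises there too): every anti-diagonal entry must exist.
def Pre_solution (grid : List (List Int)) : Prop :=
  ∀ i, i < grid.length → i < (grid.getD (grid.length - 1 - i) []).length
instance (grid : List (List Int)) : Decidable (Pre_solution grid) := by
  unfold Pre_solution; infer_instance
def pvWitness_solution : List (List Int) := [[1, 2], [3, 4]]

def Spec_solution (grid : List (List Int)) (out : List (Option Int)) : Prop := out = solution_alt grid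
instance (grid : List (List Int)) (out : List (Option Int)) : Decidable (Spec_solution grid out) := by unfold Spec_solution; infer_instance

-- ===== CLAIM (what is proved, stated in full; the proofs are below) =====
def Claim_equal_solution : Prop := ∀ (grid : List (List Int)), Dom_solution grid → Pre_solution grid → Spec_solution grid (solution grid)

-- ===== LEMMAS AND PROOFS =====

-- anti-diagonal entry, as both ports compute it
def pvDiagF (grid : List (List Int)) (k : Nat) : Int :=
  PySem.List.pyGetD (PySem.List.pyGetD grid ((grid.length : Int) - 1 - k) []) k 0

lemma solutionLoop_eq (grid : List (List Int)) (k : Nat) :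
    ∀ (c : Nat) (a b : Int), a ≤ b → c + k = grid.length →
    solutionLoop grid grid.length ((grid.length : Int) - 1 - c) c (some a) (some b) =
      (some (((List.range' c k).map (pvDiagF grid)).foldl min a),
       some (((List.range' c k).map (pvDiagF grid)).foldl max b)) := by
  induction k with
  | zero =>
      intro c a b hab hc
      rw [solutionLoop]
      simp [List.range']
      omega
  | succ k ih =>
      intro c a b hab hc
      rw [solutionLoop]
      have hcond : (0 : Int) ≤ (grid.length : Int) - 1 - c ∧ (c : Int) < grid.length := by
        constructor <;> omega
      rw [dif_pos hcond]
      have harg : ((grid.length : Int) - 1 - c) - 1 = (grid.length : Int) - 1 - (c + 1 : Nat) := by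
        push_cast; ring
      have harg2 : ((c : Int) + 1) = ((c + 1 : Nat) : Int) := by push_cast; ring
      set v := PySem.List.pyGetD (PySem.List.pyGetD grid ((grid.length : Int) - 1 - c) []) c 0 with hv
      have hvf : v = pvDiagF grid c := rfl
      have hrange : List.range' c (k + 1) = c :: List.range' (c + 1) k := by
        simp [List.range']
      rw [hrange]
      simp only [List.map_cons, List.foldl_cons, ← hvf]
      by_cases h1 : v ≤ a
      · simp only [if_pos h1, harg, harg2]
        rw [ih (c + 1) v b (by omega) (by omega)]
        have : min a v = v := by omega
        have h2 : max b v = b := by omega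
        rw [this, h2]
      · by_cases h2 : v ≥ b
        · simp only [if_neg h1, if_pos h2, harg, harg2]
          rw [ih (c + 1) a v (by omega) (by omega)]
          have : min a v = a := by omega
          have h3 : max b v = v := by omega
          rw [this, h3]
        · simp only [if_neg h1, if_neg h2, harg, harg2]
          rw [ih (c + 1) a b hab (by omega)]
          have : min a v = a := by omega
          have h3 : max b v = b := by omega
          rw [this, h3]

-- foldl min / foldl max are a lower / upper bound and a member of a :: l
lemma foldl_min_le (l : List Int) : ∀ (a : Int), l.foldl min a ≤ a ∧ ∀ x ∈ l, l.foldl min a ≤ x := by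
  induction l with
  | nil => intro a; simp
  | cons y t ih =>
      intro a
      obtain ⟨h1, h2⟩ := ih (min a y)
      simp only [List.foldl_cons]
      refine ⟨le_trans h1 (min_le_left a y), fun x hx => ?_⟩
      rcases List.mem_cons.1 hx with h | h
      · rw [h]; exact le_trans h1 (min_le_right a y)
      · exact h2 x h

lemma foldl_min_mem (l : List Int) : ∀ (a : Int), l.foldl min a ∈ a :: l := by
  induction l with
  | nil => intro a; simp
  | cons y t ih =>
      intro a
      simp only [List.foldl_cons]
      rcases List.mem_cons.1 (ih (min a y)) with h | h
      · rcases min_choice a y with hm | hm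
        · exact List.mem_cons.2 (Or.inl (h.trans hm))
        · exact List.mem_cons.2 (Or.inr (List.mem_cons.2 (Or.inl (h.trans hm))))
      · exact List.mem_cons.2 (Or.inr (List.mem_cons.2 (Or.inr h)))

lemma le_foldl_max (l : List Int) : ∀ (a : Int), a ≤ l.foldl max a ∧ ∀ x ∈ l, x ≤ l.foldl max a := by
  induction l with
  | nil => intro a; simp
  | cons y t ih =>
      intro a
      obtain ⟨h1, h2⟩ := ih (max a y)
      simp only [List.foldl_cons]
      refine ⟨le_trans (le_max_left a y) h1, fun x hx => ?_⟩
      rcases List.mem_cons.1 hx with h | h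
      · rw [h]; exact le_trans (le_max_right a y) h1
      · exact h2 x h

lemma foldl_max_mem (l : List Int) : ∀ (a : Int), l.foldl max a ∈ a :: l := by
  induction l with
  | nil => intro a; simp
  | cons y t ih =>
      intro a
      simp only [List.foldl_cons]
      rcases List.mem_cons.1 (ih (max a y)) with h | h
      · rcases max_choice a y with hm | hm
        · exact List.mem_cons.2 (Or.inl (h.trans hm))
        · exact List.mem_cons.2 (Or.inr (List.mem_cons.2 (Or.inl (h.trans hm))))
      · exact List.mem_cons.2 (Or.inr (List.mem_cons.2 (Or.inr h)))

-- bound form used below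
lemma foldl_min_le_mem (l : List Int) (a x : Int) (hx : x ∈ a :: l) : l.foldl min a ≤ x := by
  rcases List.mem_cons.1 hx with h | h
  · exact h ▸ (foldl_min_le l a).1
  · exact (foldl_min_le l a).2 x h

lemma le_foldl_max_mem (l : List Int) (a x : Int) (hx : x ∈ a :: l) : x ≤ l.foldl max a := by
  rcases List.mem_cons.1 hx with h | h
  · exact h ▸ (le_foldl_max l a).1
  · exact (le_foldl_max l a).2 x h

-- first element of the sorted list is the running min
lemma sorted_get_zero (a : Int) (l : List Int) :
    PySem.List.pyGet? (PySem.List.sorted (a :: l) (fun x => x) false) 0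
      = some (l.foldl min a) := by
  rcases hs : PySem.List.sorted (a :: l) (fun x => x) false with _ | ⟨m, t⟩
  · exact absurd ((PySem.List.sorted_eq_nil_iff _ _ _).1 hs) (by simp)
  · rw [PySem.List.pyGet?_zero_cons]
    have hmem : m ∈ a :: l := by
      have : m ∈ PySem.List.sorted (a :: l) (fun x => x) false := by rw [hs]; simp
      exact (PySem.List.mem_sorted _ _ _ _).1 this
    have h1 : l.foldl min a ≤ m := foldl_min_le_mem l a m hmem
    have h2 : m ≤ l.foldl min a :=
      PySem.List.key_head_sorted_le (a :: l) (fun x => x) hs _ (foldl_min_mem l a)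
    exact congrArg some (le_antisymm h2 h1)

-- last element of the sorted list is the running max
lemma sorted_get_last (a : Int) (l : List Int) :
    PySem.List.pyGet? (PySem.List.sorted (a :: l) (fun x => x) false) (-1)
      = some (l.foldl max a) := by
  set s := PySem.List.sorted (a :: l) (fun x => x) false with hs
  have hne : s ≠ [] := by
    intro h
    exact absurd ((PySem.List.sorted_eq_nil_iff _ _ _).1 (hs ▸ h)) (by simp)
  rw [PySem.List.pyGet?_neg_one, List.getLast?_eq_some_getLast hne]
  congr 1
  have hmemL : s.getLast hne ∈ a :: l :=
    (PySem.List.mem_sorted (a :: l) (fun x => x) false _).1 (List.getLast_mem hne)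
  have h1 : s.getLast hne ≤ l.foldl max a := le_foldl_max_mem l a _ hmemL
  obtain ⟨p, hp, hpe⟩ := List.mem_iff_getElem.1
    (by rw [hs]; exact (PySem.List.mem_sorted _ _ _ _).2 (foldl_max_mem l a) : l.foldl max a ∈ s)
  have h2 : l.foldl max a ≤ s.getLast hne := by
    rw [List.getLast_eq_getElem]
    calc l.foldl max a = s[p] := hpe.symm
      _ ≤ s[s.length - 1] := by
          have := PySem.List.sorted_id_getElem_mono (a :: l) (p := p) (q := s.length - 1)
            (by omega) (by rw [← hs]; omega)
          simpa [← hs] using this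
  exact le_antisymm h1 h2

-- ===== VERDICT (by name: the statement is the Claim_ definition above) =====
theorem solution_spec : Claim_equal_solution := by
  intro grid _ _
  unfold Spec_solution solution solution_alt
  by_cases hnil : grid.length = 0
  · simp [hnil]
  · obtain ⟨m, hm⟩ : ∃ m, grid.length = m + 1 := ⟨grid.length - 1, by omega⟩
    rw [if_neg hnil, if_neg hnil]
    have hdiag : (PySem.List.pyRange 0 (grid.length) 1).map
        (fun i => PySem.List.pyGetD (PySem.List.pyGetD grid ((grid.length : Int) - 1 - i) []) i 0)
        = (List.range' 0 grid.length).map (pvDiagF grid) := by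
      rw [PySem.List.pyRange_zero_natCast, List.map_map, ← List.range_eq_range']
      rfl
    have hdiag2 : List.range' 0 grid.length = 0 :: List.range' 1 m := by
      rw [hm, List.range'_succ]
    simp only [hdiag, hdiag2, List.map_cons]
    rw [sorted_get_zero, sorted_get_last]
    -- A's loop: first iteration sets min = max = pvDiagF grid 0
    show [(solutionLoop grid grid.length ((grid.length : Int) - 1) 0 none none).1,
          (solutionLoop grid grid.length ((grid.length : Int) - 1) 0 none none).2] = _
    rw [solutionLoop]
    have hcond : (0 : Int) ≤ (grid.length : Int) - 1 ∧ (0 : Int) < grid.length := by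
      constructor <;> omega
    rw [dif_pos hcond]
    have hv : PySem.List.pyGetD (PySem.List.pyGetD grid ((grid.length : Int) - 1) []) 0 0
        = pvDiagF grid 0 := by
      simp [pvDiagF]
    have key := solutionLoop_eq grid m 1 (pvDiagF grid 0) (pvDiagF grid 0) le_rfl (by omega)
    push_cast at key
    norm_num at key ⊢
    rw [hv, key]
    exact ⟨rfl, rfl⟩
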